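-- pv_equiv track=rewrite | github.com/pushpa-info-14/python-programming | LeetCode/2500-3000/Q2515 Shortest Distance to Target String in a Circular Array.py | closestTarget
-- ===== SOURCE A (Python) =====
-- from typing import List
--
-- def closestTarget(words: List[str], target: str, startIndex: int) -> int:
--     n = len(words)
--     indexes = []
--     for i in range(n):
--         if words[i] == target:
--             indexes.append(i)
--     if len(indexes) == 0:
--         return -1
--     res = n
--     for i in indexes:
--         d = abs(startIndex - i)
--         res = min(res, d, n - d)
--     return res
-- ===== SOURCE B (Python) =====
-- def closestTarget(words, target, startIndex):
--     n = len(words)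
--     if n == 0:
--         return -1
--     for d in range(n // 2 + 1):
--         if words[(startIndex + d) % n] == target or words[(startIndex - d) % n] == target:
--             return d
--     return -1
-- ===== Notes on version B (the rewrite author's own statement) =====
-- stated objective: alternative
-- what changed: Replaces the collect-matching-indices-then-minimize scan with an expanding ring search: walk outward from startIndex mod n (distance d = 0,1,...,n//2), probing words[(startIndex+d)%n] and words[(startIndex-d)%n], and return the first d that hits the target, so the answer is found by early exit without ever computing per-match distances.
-- intended difference: When some matching index i lies farther than n from startIndex (only possible when startIndex is outside the valid range [0,n)), A's n-|startIndex-i| term goes negative and A returns a negative 'distance' (e.g. -2), which is meaningless; B treats startIndex circularly via mod and returns the true nonnegative circular distance, the intended value. — e.g. on closestTarget(["a", "b"], "a", 4): A returns -2, B returns 0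
import Mathlib
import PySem

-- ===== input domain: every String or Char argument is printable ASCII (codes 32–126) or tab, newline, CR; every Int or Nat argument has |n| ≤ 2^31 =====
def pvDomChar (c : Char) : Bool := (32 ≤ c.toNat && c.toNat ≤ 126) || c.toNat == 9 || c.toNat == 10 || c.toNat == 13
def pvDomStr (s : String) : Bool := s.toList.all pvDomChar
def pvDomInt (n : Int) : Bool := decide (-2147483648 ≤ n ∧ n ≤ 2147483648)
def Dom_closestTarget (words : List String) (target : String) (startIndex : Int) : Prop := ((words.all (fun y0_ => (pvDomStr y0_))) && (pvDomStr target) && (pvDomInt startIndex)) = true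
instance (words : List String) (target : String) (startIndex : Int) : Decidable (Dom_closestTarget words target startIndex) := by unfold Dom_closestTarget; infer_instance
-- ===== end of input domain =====

-- B replaces A's collect-matches-then-minimize scan by an expanding ring search
-- outward from startIndex mod n with early exit; on inputs where a match lies
-- farther than n from startIndex, A returns a negative "distance" and B the
-- intended circular distance (see D_ below). Equivalence is proved outside D_.


-- ===== PORT A =====
-- 'for i in range(n)' → fold over pyRange 0 n 1; indices produced are in range,
-- so pyGetD with default "" is exact there.
def closestTarget (words : List String) (target : String) (startIndex : Int) : Int :=
  let n : Int := words.length
  let indexes : List Int :=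
    (PySem.List.pyRange 0 n 1).foldl
      (fun acc i => if PySem.List.pyGetD words i "" == target then acc ++ [i] else acc) []
  if indexes.length = 0 then -1
  else
    indexes.foldl
      (fun res i => min (min res |startIndex - i|) ((n : Int) - |startIndex - i|)) n

-- ===== PORT B =====
-- 'for d in range(n//2+1): if hit: return d' → structural recursion over the
-- range list, returning the first d that hits; words[(startIndex±d)%n] is in
-- range (n > 0 there), so pyGetD with default "" is exact.
def hitP (words : List String) (target : String) (i : Int) : Bool :=
  PySem.List.pyGetD words i "" == target

-- the loop body's test: 'words[(startIndex+d)%n] == target or words[(startIndex-d)%n] == target'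
def hit2 (words : List String) (target : String) (s0 n d : Int) : Bool :=
  hitP words target (PySem.Int.mod (s0 + d) n)
  || hitP words target (PySem.Int.mod (s0 - d) n)

def ringGo (words : List String) (target : String) (startIndex n : Int) : List Int → Int
  | [] => -1
  | d :: rest =>
      if hit2 words target startIndex n d
      then d
      else ringGo words target startIndex n rest

def closestTarget_alt (words : List String) (target : String) (startIndex : Int) : Int :=
  let n : Int := words.length
  if n == 0 then -1
  else ringGo words target startIndex n
        (PySem.List.pyRange 0 (PySem.Int.floordiv n 2 + 1) 1)

-- ===== PRECONDITION & SPEC =====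
-- On inputs where some matching index i lies farther than n from startIndex
-- (possible only when startIndex is outside [0,n)), A's term n-|startIndex-i|
-- is negative and A returns a negative "distance"; B takes startIndex mod n and
-- returns the true nonnegative circular distance, the intended value.
def D_closestTarget (words : List String) (target : String) (startIndex : Int) : Prop :=
  ∃ k < words.length, words[k]? = some target ∧ (words.length : Int) < |startIndex - (k : Int)|
instance (words : List String) (target : String) (startIndex : Int) : Decidable (D_closestTarget words target startIndex) := by unfold D_closestTarget; infer_instance

def Spec_closestTarget (words : List String) (target : String) (startIndex : Int) (out : Int) : Prop := ¬ D_closestTarget words target startIndex → out = closestTarget_alt words target startIndex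
instance (words : List String) (target : String) (startIndex : Int) (out : Int) : Decidable (Spec_closestTarget words target startIndex out) := by unfold Spec_closestTarget; infer_instance

def pvDiffWitness_closestTarget : List String × String × Int := (["a", "b"], "a", 4)
def pvDiffWitnessOut_closestTarget : Int × Int := (-2, 0)

-- ===== CLAIM =====
def Claim_unchanged_closestTarget : Prop := ∀ (words : List String) (target : String) (startIndex : Int), Dom_closestTarget words target startIndex → Spec_closestTarget words target startIndex (closestTarget words target startIndex)
def Claim_changed_closestTarget : Prop := Dom_closestTarget (pvDiffWitness_closestTarget.1) (pvDiffWitness_closestTarget.2.1) (pvDiffWitness_closestTarget.2.2) ∧ D_closestTarget (pvDiffWitness_closestTarget.1) (pvDiffWitness_closestTarget.2.1) (pvDiffWitness_closestTarget.2.2) ∧ closestTarget (pvDiffWitness_closestTarget.1) (pvDiffWitness_closestTarget.2.1) (pvDiffWitness_closestTarget.2.2) = pvDiffWitnessOut_closestTarget.1 ∧ closestTarget_alt (pvDiffWitness_closestTarget.1) (pvDiffWitness_closestTarget.2.1) (pvDiffWitness_closestTarget.2.2) = pvDiffWitnessOut_closestTarget.2 ∧ pvDiffWitnessOut_closestTarget.1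 ≠ pvDiffWitnessOut_closestTarget.2
def Claim_exact_closestTarget : Prop := ∀ (words : List String) (target : String) (startIndex : Int), Dom_closestTarget words target startIndex → D_closestTarget words target startIndex → closestTarget words target startIndex ≠ closestTarget_alt words target startIndex

-- ===== LEMMAS AND PROOFS =====

theorem ringGo_eq_find? (words : List String) (target : String) (s n : Int)
    (l : List Int) :
    ringGo words target s n l = ((l.find? (hit2 words target s n)).getD (-1)) := by
  induction l with
  | nil => rfl
  | cons d rest ih =>
    rw [ringGo, List.find?_cons]
    cases hh : hit2 words target s n d
    · rw [if_neg (by simp)]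
      exact ih
    · rw [if_pos rfl]
      rfl

-- ---------- pure Int arithmetic on the ring ----------

theorem emod_sub_left (a b n : Int) : (a % n - b) % n = (a - b) % n := by
  rw [Int.sub_emod, Int.emod_emod_of_dvd a dvd_rfl, ← Int.sub_emod]

theorem emod_sub_right (a b n : Int) : (b - a % n) % n = (b - a) % n := by
  rw [Int.sub_emod, Int.emod_emod_of_dvd a dvd_rfl, ← Int.sub_emod]

theorem emod_add_right (a b n : Int) : (a + b % n) % n = (a + b) % n := by
  rw [Int.add_emod, Int.emod_emod_of_dvd b dvd_rfl, ← Int.add_emod]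

theorem emod_sub_self (x n : Int) : (x - n) % n = x % n := by
  rw [Int.sub_emod, Int.emod_self, sub_zero, Int.emod_emod_of_dvd x dvd_rfl]

theorem emod_add_self (x n : Int) : (x + n) % n = x % n := by
  rw [Int.add_emod, Int.emod_self, add_zero, Int.emod_emod_of_dvd x dvd_rfl]

-- Y is determined by X on the ring: X := (s0-i)%n, Y := (i-s0)%n
theorem pair_emod (s0 i n : Int) (hn : 0 < n) :
    (i - s0) % n = (if (s0 - i) % n = 0 then 0 else n - (s0 - i) % n) := by
  have h1 : i - s0 = (n - (s0 - i)) - n := by ring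
  have h2 : (i - s0) % n = (n - (s0 - i) % n) % n := by
    rw [h1, emod_sub_self, emod_sub_right]
  have hX0 : 0 ≤ (s0 - i) % n := Int.emod_nonneg _ hn.ne'
  have hXn : (s0 - i) % n < n := Int.emod_lt_of_pos _ hn
  by_cases h : (s0 - i) % n = 0
  · rw [if_pos h, h2, h, sub_zero, Int.emod_self]
  · rw [if_neg h, h2, Int.emod_eq_of_lt (by omega) (by omega)]

theorem emod_bounds (a n : Int) (hn : 0 < n) : 0 ≤ a % n ∧ a % n < n :=
  ⟨Int.emod_nonneg _ hn.ne', Int.emod_lt_of_pos _ hn⟩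

-- outside D_, A's per-match value is the circular distance
theorem match_formula (s0 i n : Int) (hn : 0 < n) (_h0 : 0 ≤ i) (_hin : i < n)
    (habs : |s0 - i| ≤ n) :
    min |s0 - i| (n - |s0 - i|) = min ((s0 - i) % n) ((i - s0) % n) := by
  have hp := pair_emod s0 i n hn
  rcases le_or_gt 0 (s0 - i) with h | h
  · rcases lt_or_eq_of_le (show s0 - i ≤ n by rw [abs_of_nonneg h] at habs; exact habs) with h2 | h2
    · have hX : (s0 - i) % n = s0 - i := Int.emod_eq_of_lt h h2
      rw [hX] at hp
      rw [hX, hp, abs_of_nonneg h]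
      omega
    · have hX : (s0 - i) % n = 0 := by rw [h2, Int.emod_self]
      rw [hX] at hp
      rw [hX, hp, abs_of_nonneg h]
      omega
  · have habs' : -n ≤ s0 - i := by rw [abs_of_neg h] at habs; omega
    rcases lt_or_eq_of_le habs' with h2 | h2
    · have hX : (s0 - i) % n = s0 - i + n := by
        rw [← emod_add_self (s0 - i) n, Int.emod_eq_of_lt (by omega) (by omega)]
      rw [hX] at hp
      rw [hX, hp, abs_of_neg h]
      omega
    · have hX : (s0 - i) % n = 0 := by
        rw [← emod_add_self (s0 - i) n, ← h2]
        simp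
      rw [hX] at hp
      rw [hX, hp, abs_of_neg h]
      omega

-- every circular distance is in [0, n/2] (stated multiplicatively)
theorem cd_bounds (s0 i n : Int) (hn : 0 < n) :
    0 ≤ min ((s0 - i) % n) ((i - s0) % n) ∧
      2 * min ((s0 - i) % n) ((i - s0) % n) ≤ n := by
  have hp := pair_emod s0 i n hn
  have hb := emod_bounds (s0 - i) n hn
  constructor
  · have := emod_bounds (i - s0) n hn; omega
  · by_cases h : (s0 - i) % n = 0
    · rw [if_pos h] at hp; omega
    · rw [if_neg h] at hp; omega

theorem unshift_plus (s0 i d n : Int) (_hn : 0 < n) (h0 : 0 ≤ i) (hin : i < n)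
    (hd : (i - s0) % n = d) : (s0 + d) % n = i := by
  rw [← hd, emod_add_right]
  have h : s0 + (i - s0) = i := by ring
  rw [h, Int.emod_eq_of_lt h0 hin]

theorem unshift_minus (s0 i d n : Int) (_hn : 0 < n) (h0 : 0 ≤ i) (hin : i < n)
    (hd : (s0 - i) % n = d) : (s0 - d) % n = i := by
  rw [← hd, emod_sub_right]
  have h : s0 - (s0 - i) = i := by ring
  rw [h, Int.emod_eq_of_lt h0 hin]

theorem shift_plus (s0 d n : Int) (hn : 0 < n) (hd0 : 0 ≤ d) (hdn : d < n) :
    (((s0 + d) % n) - s0) % n = d ∧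
      (s0 - (s0 + d) % n) % n = (if d = 0 then 0 else n - d) := by
  have h1 : (((s0 + d) % n) - s0) % n = d := by
    rw [emod_sub_left]
    have h : s0 + d - s0 = d := by ring
    rw [h, Int.emod_eq_of_lt hd0 hdn]
  refine ⟨h1, ?_⟩
  have hp2 := pair_emod ((s0 + d) % n) s0 n hn
  rw [h1] at hp2
  exact hp2

theorem shift_minus (s0 d n : Int) (hn : 0 < n) (hd0 : 0 ≤ d) (hdn : d < n) :
    (s0 - ((s0 - d) % n)) % n = d ∧
      (((s0 - d) % n) - s0) % n = (if d = 0 then 0 else n - d) := by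
  have h1 : (s0 - ((s0 - d) % n)) % n = d := by
    rw [emod_sub_right]
    have h : s0 - (s0 - d) = d := by ring
    rw [h, Int.emod_eq_of_lt hd0 hdn]
  refine ⟨h1, ?_⟩
  have hp2 := pair_emod s0 ((s0 - d) % n) n hn
  rw [h1] at hp2
  exact hp2

-- ---------- folds over min ----------

theorem foldl_min_const (l : List Int) : ∀ c : Int, (∀ x ∈ l, c ≤ x) → l.foldl min c = c := by
  induction l with
  | nil => intro c _; rfl
  | cons a l ih =>
    intro c h
    rw [List.foldl_cons, min_eq_left (h a (by simp))]
    exact ih c (fun x hx => h x (by simp [hx]))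

theorem foldl_min_eq (l : List Int) (m : Int) : ∀ c : Int, m ≤ c → m ∈ l →
    (∀ x ∈ l, m ≤ x) → l.foldl min c = m := by
  induction l with
  | nil => intro c _ h; cases h
  | cons a l ih =>
    intro c hc hmem hlb
    rw [List.foldl_cons]
    rcases List.mem_cons.mp hmem with h | h
    · subst h
      rw [min_eq_right hc]
      exact foldl_min_const l m (fun x hx => hlb x (by simp [hx]))
    · exact ih (min c a) (le_min hc (hlb a (by simp))) h
        (fun x hx => hlb x (by simp [hx]))

theorem foldl_min_le_init (l : List Int) : ∀ c : Int, l.foldl min c ≤ c := by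
  induction l with
  | nil => intro c; exact le_refl c
  | cons a l ih =>
    intro c
    rw [List.foldl_cons]
    exact le_trans (ih (min c a)) (min_le_left c a)

theorem foldl_min_le (l : List Int) (x : Int) : ∀ c : Int, x ∈ l → l.foldl min c ≤ x := by
  induction l with
  | nil => intro c h; cases h
  | cons a l ih =>
    intro c h
    rw [List.foldl_cons]
    rcases List.mem_cons.mp h with h | h
    · subst h
      exact le_trans (foldl_min_le_init l (min c x)) (min_le_right c x)
    · exact ih (min c a) h

theorem exists_min (l : List Int) (h : l ≠ []) : ∃ m ∈ l, ∀ x ∈ l, m ≤ x := by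
  induction l with
  | nil => exact absurd rfl h
  | cons a l ih =>
    rcases eq_or_ne l [] with h2 | h2
    · subst h2; exact ⟨a, by simp, by simp⟩
    · obtain ⟨m, hm, hlb⟩ := ih h2
      rcases le_total a m with h3 | h3
      · exact ⟨a, by simp, by
          intro x hx
          rcases List.mem_cons.mp hx with h4 | h4
          · omega
          · exact le_trans h3 (hlb x h4)⟩
      · exact ⟨m, by simp [hm], by
          intro x hx
          rcases List.mem_cons.mp hx with h4 | h4
          · omega
          · exact hlb x h4⟩

-- find? on an increasing integer range returns the least satisfying element
theorem find?_pyRange_first (p : Int → Bool) (b d : Int) : ∀ (a : Int), a ≤ d → d < b →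
    p d = true → (∀ e, a ≤ e → e < d → p e = false) →
    (PySem.List.pyRange a b 1).find? p = some d := by
  have key : ∀ (k : Nat) (a : Int), (d - a).toNat = k → a ≤ d → d < b →
      p d = true → (∀ e, a ≤ e → e < d → p e = false) →
      (PySem.List.pyRange a b 1).find? p = some d := by
    intro k
    induction k with
    | zero =>
      intro a hk ha hb hp _
      have : a = d := by omega
      subst this
      rw [PySem.List.pyRange_one_cons (by omega), List.find?_cons, hp]
    | succ k ih =>
      intro a hk ha hb hp hmin
      have hlt : a < d := by omega
      rw [PySem.List.pyRange_one_cons (by omega), List.find?_cons,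
          hmin a le_rfl hlt]
      exact ih (a + 1) (by omega) (by omega) hb hp
        (fun e he1 he2 => hmin e (by omega) he2)
  intro a
  exact key (d - a).toNat a rfl


-- ---------- bridging the ports ----------

theorem mem_matchL (words : List String) (target : String) (i : Int) :
    i ∈ (PySem.List.pyRange 0 (words.length : Int) 1).filter (fun j => PySem.List.pyGetD words j "" == target)
      ↔ 0 ≤ i ∧ i < (words.length : Int) ∧ hitP words target i = true := by
  rw [List.mem_filter, PySem.List.mem_pyRange_one]
  unfold hitP
  tauto

theorem hitP_iff_getElem? (words : List String) (target : String) (i : Int)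
    (h0 : 0 ≤ i) (hin : i < (words.length : Int)) :
    hitP words target i = true ↔ words[i.toNat]? = some target := by
  unfold hitP
  rw [PySem.List.pyGetD_eq_getElem words "" h0 hin, beq_iff_eq,
      List.getElem?_eq_getElem (by omega)]
  simp

-- ¬D_ gives the per-match bound A's formula needs
theorem notD_bound (words : List String) (target : String) (startIndex : Int)
    (hnd : ¬ D_closestTarget words target startIndex) :
    ∀ i : Int, 0 ≤ i → i < (words.length : Int) → hitP words target i = true →
      |startIndex - i| ≤ (words.length : Int) := by
  intro i h0 hin hp
  by_contra hgt
  exact hnd ⟨i.toNat, by omega, (hitP_iff_getElem? words target i h0 hin).mp hp,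
    by rw [Int.toNat_of_nonneg h0]; omega⟩

-- hit at distance d produces a match at circular distance exactly d
theorem hit_to_match (words : List String) (target : String) (s0 d : Int)
    (hn : 0 < (words.length : Int)) (hd0 : 0 ≤ d) (hdh : 2 * d ≤ (words.length : Int))
    (hhit : hit2 words target s0 (words.length : Int) d = true) :
    ∃ i : Int, 0 ≤ i ∧ i < (words.length : Int) ∧ hitP words target i = true ∧
      min ((s0 - i) % (words.length : Int)) ((i - s0) % (words.length : Int)) = d := by
  set n : Int := (words.length : Int) with hn_def
  have hdn : d < n := by omega
  unfold hit2 at hhit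
  simp only [PySem.Int.mod_eq_emod_of_pos hn] at hhit
  rw [Bool.or_eq_true] at hhit
  rcases hhit with h | h
  · refine ⟨(s0 + d) % n, (emod_bounds _ n hn).1, (emod_bounds _ n hn).2, h, ?_⟩
    obtain ⟨h1, h2⟩ := shift_plus s0 d n hn hd0 hdn
    rw [h1, h2]
    by_cases hd : d = 0
    · rw [if_pos hd]; omega
    · rw [if_neg hd]; omega
  · refine ⟨(s0 - d) % n, (emod_bounds _ n hn).1, (emod_bounds _ n hn).2, h, ?_⟩
    obtain ⟨h1, h2⟩ := shift_minus s0 d n hn hd0 hdn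
    rw [h1, h2]
    by_cases hd : d = 0
    · rw [if_pos hd]; omega
    · rw [if_neg hd]; omega

-- a match at circular distance c produces a hit at distance c
theorem match_to_hit (words : List String) (target : String) (s0 i : Int)
    (hn : 0 < (words.length : Int)) (h0 : 0 ≤ i) (hin : i < (words.length : Int))
    (hp : hitP words target i = true) :
    hit2 words target s0 (words.length : Int)
      (min ((s0 - i) % (words.length : Int)) ((i - s0) % (words.length : Int))) = true := by
  set n : Int := (words.length : Int) with hn_def
  set X : Int := (s0 - i) % n with hX_def
  set Y : Int := (i - s0) % n with hY_def
  unfold hit2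
  simp only [PySem.Int.mod_eq_emod_of_pos hn]
  rw [Bool.or_eq_true]
  rcases le_total Y X with h | h
  · left
    rw [min_eq_right h, unshift_plus s0 i Y n hn h0 hin rfl]
    exact hp
  · right
    rw [min_eq_left h, unshift_minus s0 i X n hn h0 hin rfl]
    exact hp

-- A's value, characterised
theorem closestTarget_char (words : List String) (target : String) (s0 : Int) :
    closestTarget words target s0 =
      (if ((PySem.List.pyRange 0 (words.length : Int) 1).filter
            (fun j => PySem.List.pyGetD words j "" == target)) = [] then -1
       else (((PySem.List.pyRange 0 (words.length : Int) 1).filter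
            (fun j => PySem.List.pyGetD words j "" == target)).map
              (fun i => min |s0 - i| ((words.length : Int) - |s0 - i|))).foldl
            min (words.length : Int)) := by
  simp only [closestTarget]
  rw [PySem.List.foldl_append_if_eq_filter, List.nil_append]
  set L := (PySem.List.pyRange 0 (words.length : Int) 1).filter
      (fun j => PySem.List.pyGetD words j "" == target) with hL
  by_cases h : L = []
  · rw [if_pos (by rw [h]; rfl), if_pos h]
  · rw [if_neg (by simpa [List.length_eq_zero_iff] using h), if_neg h, List.foldl_map]
    congr 1
    funext r i
    rw [min_assoc]

-- B's value, characterised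
theorem closestTarget_alt_char (words : List String) (target : String) (s0 : Int)
    (hn : 0 < (words.length : Int)) :
    closestTarget_alt words target s0 =
      (((PySem.List.pyRange 0
          (PySem.Int.floordiv (words.length : Int) 2 + 1) 1).find?
            (hit2 words target s0 (words.length : Int))).getD (-1)) := by
  simp only [closestTarget_alt]
  rw [if_neg (by simp only [beq_iff_eq]; omega), ringGo_eq_find?]

-- the main equivalence outside D_
theorem AB_eq (words : List String) (target : String) (s0 : Int)
    (hnd : ¬ D_closestTarget words target s0) :
    closestTarget words target s0 = closestTarget_alt words target s0 := by
  rcases Nat.eq_zero_or_pos words.length with hz | hpos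
  · rw [List.length_eq_zero_iff] at hz
    subst hz
    rfl
  have hn : 0 < (words.length : Int) := by exact_mod_cast hpos
  set n : Int := (words.length : Int) with hn_def
  set F : Int := PySem.Int.floordiv n 2 with hF_def
  have hF2 : ∀ e : Int, e ≤ F ↔ 2 * e ≤ n := by
    intro e
    rw [hF_def, PySem.Int.le_floordiv_iff_mul_le (by omega)]
    omega
  set L := (PySem.List.pyRange 0 n 1).filter
      (fun j => PySem.List.pyGetD words j "" == target) with hL
  rw [closestTarget_char, closestTarget_alt_char words target s0 hn]
  by_cases h : L = []
  · rw [if_pos h]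
    have hnone : (PySem.List.pyRange 0 (F + 1) 1).find?
        (hit2 words target s0 n) = none := by
      rw [List.find?_eq_none]
      intro d hd
      rw [PySem.List.mem_pyRange_one] at hd
      intro hhit
      obtain ⟨i, h0, hin, hp, _⟩ := hit_to_match words target s0 d hn hd.1
        (by rw [← hF2]; omega) hhit
      have : i ∈ L := (mem_matchL words target i).mpr ⟨h0, hin, hp⟩
      rw [h] at this
      cases this
    rw [hnone]
    rfl
  · rw [if_neg h]
    have hmapne : L.map (fun i => min ((s0 - i) % n) ((i - s0) % n)) ≠ [] := by
      simpa using h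
    obtain ⟨m, hm_mem, hm_lb⟩ := exists_min _ hmapne
    obtain ⟨i0, hi0L, hi0m⟩ := List.mem_map.mp hm_mem
    obtain ⟨h00, h0n, h0p⟩ := (mem_matchL words target i0).mp hi0L
    have hcb := cd_bounds s0 i0 n hn
    have hm0 : 0 ≤ m := by omega
    have hm2 : 2 * m ≤ n := by omega
    -- A = m
    have hmapeq : L.map (fun i => min |s0 - i| (n - |s0 - i|))
        = L.map (fun i => min ((s0 - i) % n) ((i - s0) % n)) := by
      apply List.map_congr_left
      intro i hiL
      obtain ⟨hi0, hin, hip⟩ := (mem_matchL words target i).mp hiL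
      exact match_formula s0 i n hn hi0 hin (notD_bound words target s0 hnd i hi0 hin hip)
    rw [hmapeq, foldl_min_eq _ m n (by omega) hm_mem hm_lb]
    -- B = m
    have hsome : (PySem.List.pyRange 0 (F + 1) 1).find?
        (hit2 words target s0 n) = some m := by
      apply find?_pyRange_first _ (F + 1) m 0 hm0
        (by rw [show m < F + 1 ↔ m ≤ F by omega, hF2]; exact hm2)
      · rw [← hi0m]
        exact match_to_hit words target s0 i0 hn h00 h0n h0p
      · intro e he0 hem
        by_contra hc
        rw [Bool.not_eq_false] at hc
        obtain ⟨i, hi0, hin, hip, hie⟩ := hit_to_match words target s0 e hn he0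
          (by omega) hc
        have : m ≤ e := by
          rw [← hie]
          exact hm_lb _ (List.mem_map.mpr ⟨i, (mem_matchL words target i).mpr ⟨hi0, hin, hip⟩, rfl⟩)
        omega
    rw [hsome]
    rfl

-- ===== VERDICT =====
theorem closestTarget_spec : Claim_unchanged_closestTarget := by
  intro words target startIndex _
  unfold Spec_closestTarget
  intro hnd
  exact AB_eq words target startIndex hnd

theorem closestTarget_changed : Claim_changed_closestTarget := by
  unfold Claim_changed_closestTarget; decide

theorem closestTarget_tight : Claim_exact_closestTarget := by
  intro words target s0 _ hd
  obtain ⟨k, hk, hkt, hkd⟩ := hd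
  have hpos : 0 < words.length := by omega
  have hn : 0 < (words.length : Int) := by exact_mod_cast hpos
  set n : Int := (words.length : Int) with hn_def
  set i : Int := (k : Int) with hi_def
  have h0 : 0 ≤ i := by positivity
  have hin : i < n := by rw [hi_def, hn_def]; exact_mod_cast hk
  have hip : hitP words target i = true := by
    rw [hitP_iff_getElem? words target i h0 hin]
    simpa [hi_def] using hkt
  have hiL : i ∈ (PySem.List.pyRange 0 n 1).filter
      (fun j => PySem.List.pyGetD words j "" == target) :=
    (mem_matchL words target i).mpr ⟨h0, hin, hip⟩
  -- A is negative
  have hA : closestTarget words target s0 < 0 := by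
    rw [closestTarget_char, ← hn_def]
    rw [if_neg (by intro hc; rw [hc] at hiL; cases hiL)]
    have hmm : min |s0 - i| (n - |s0 - i|) ∈
        ((PySem.List.pyRange 0 n 1).filter
          (fun j => PySem.List.pyGetD words j "" == target)).map
          (fun i => min |s0 - i| (n - |s0 - i|)) :=
      List.mem_map_of_mem hiL
    have hle := foldl_min_le _ _ n hmm
    have : n - |s0 - i| < 0 := by omega
    omega
  -- B is nonnegative
  have hB : 0 ≤ closestTarget_alt words target s0 := by
    rw [closestTarget_alt_char words target s0 hn]
    have hcb := cd_bounds s0 i n hn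
    set c : Int := min ((s0 - i) % n) ((i - s0) % n) with hc_def
    have hhit : hit2 words target s0 n c = true := match_to_hit words target s0 i hn h0 hin hip
    have hcF : c < PySem.Int.floordiv n 2 + 1 := by
      rw [show c < PySem.Int.floordiv n 2 + 1 ↔ c ≤ PySem.Int.floordiv n 2 by omega,
          PySem.Int.le_floordiv_iff_mul_le (by omega)]
      omega
    have hmem : c ∈ PySem.List.pyRange 0 (PySem.Int.floordiv n 2 + 1) 1 := by
      rw [PySem.List.mem_pyRange_one]
      omega
    have hissome : ((PySem.List.pyRange 0 (PySem.Int.floordiv n 2 + 1) 1).find?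
        (hit2 words target s0 n)).isSome := by
      rw [List.find?_isSome]
      exact ⟨c, hmem, hhit⟩
    obtain ⟨d1, hd1⟩ := Option.isSome_iff_exists.mp hissome
    have hd1mem := List.mem_of_find?_eq_some hd1
    rw [PySem.List.mem_pyRange_one] at hd1mem
    rw [hd1]
    simpa using hd1mem.1
  omega
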